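-- pv_equiv track=rewrite | github.com/lubo/useful-scripts | bookmarkmgr/bookmarkmgr/utils/link_metadata.py | metadata_to_note
-- ===== SOURCE A (Python) =====
-- from collections.abc import Iterable
--
-- _HIDDEN_SECTION_END = "-->"
--
-- _HIDDEN_SECTION_START = "<!--"
--
-- _LINE_PREFIX = "- "
--
-- _VISIBLE_METADATA = {
--     "Archive (AT)",
--     "Archive (WM)",
-- }
--
-- Metadata = dict[str, str]
--
-- def _pairs_to_lines(pairs: Iterable[tuple[str, str]]) -> list[str]:
--     return [f"{_LINE_PREFIX}{key}: {value}" for key, value in sorted(pairs)]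
--
-- def metadata_to_note(metadata: Metadata) -> str:
--     hidden: list[tuple[str, str]] = []
--     visible: list[tuple[str, str]] = []
--
--     for key, value in metadata.items():
--         group = visible if key in _VISIBLE_METADATA else hidden
--         group.append((key, value))
--
--     lines = _pairs_to_lines(visible)
--
--     if hidden:
--         lines += [
--             _HIDDEN_SECTION_START,
--             *_pairs_to_lines(hidden),
--             _HIDDEN_SECTION_END,
--         ]
--
--     return "\n".join(lines)
-- ===== SOURCE B (Python) =====
-- _HIDDEN_SECTION_END = "-->"
-- _HIDDEN_SECTION_START = "<!--"
-- _LINE_PREFIX = "- "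
-- _VISIBLE_METADATA = {
--     "Archive (AT)",
--     "Archive (WM)",
-- }
--
-- def metadata_to_note(metadata):
--     # Single pass over the globally sorted items, concatenating each formatted
--     # line directly onto the growing visible/hidden section TEXT (no intermediate
--     # line lists, no join): each section is None until its first line arrives.
--     vis = None
--     hid = None
--     for key, value in sorted(metadata.items()):
--         line = f"{_LINE_PREFIX}{key}: {value}"
--         if key in _VISIBLE_METADATA:
--             vis = line if vis is None else f"{vis}\n{line}"
--         else:
--             hid = line if hid is None else f"{hid}\n{line}"
--     if hid is not None:
--         hid = f"{_HIDDEN_SECTION_START}\n{hid}\n{_HIDDEN_SECTION_END}"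
--     if vis is None:
--         return hid if hid is not None else ""
--     return vis if hid is None else f"{vis}\n{hid}"
-- ===== Notes on version B (the rewrite author's own statement) =====
-- stated objective: alternative
-- what changed: B replaces A's collect-pairs-into-two-lists / sort-each-bucket / map-to-lines / list-join pipeline by a single fold over the globally sorted items that concatenates each formatted line directly onto two growing section texts (None until first line, no intermediate line lists, no join), then stitches the note from the two optional texts; it trades list machinery for direct string accumulation, which costs quadratic string copying on large inputs.
import Mathlib
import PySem

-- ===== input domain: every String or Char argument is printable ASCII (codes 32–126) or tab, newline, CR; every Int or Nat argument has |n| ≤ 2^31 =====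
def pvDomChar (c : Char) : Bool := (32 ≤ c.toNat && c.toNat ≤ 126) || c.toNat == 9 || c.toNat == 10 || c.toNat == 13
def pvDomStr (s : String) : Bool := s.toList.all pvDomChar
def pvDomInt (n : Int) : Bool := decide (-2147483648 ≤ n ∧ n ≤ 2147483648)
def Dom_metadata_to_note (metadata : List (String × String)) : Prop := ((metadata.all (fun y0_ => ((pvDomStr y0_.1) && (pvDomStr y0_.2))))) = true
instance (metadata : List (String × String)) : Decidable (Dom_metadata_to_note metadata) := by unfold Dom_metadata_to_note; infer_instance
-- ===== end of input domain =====

-- B replaces A's pair-list buckets + per-bucket sort + line lists + join by one fold over the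
-- globally sorted items that concatenates each line directly onto two Option-valued section strings.

-- ===== PORT A =====
-- _VISIBLE_METADATA (a Python set literal)
def pvVisibleMetadata : List String := PySem.Set.ofList ["Archive (AT)", "Archive (WM)"]

-- _pairs_to_lines: sorted(pairs) then the f-string lines (f-string ported as concatenation, exact on ASCII)
def pvPairsToLines (pairs : List (String × String)) : List String :=
  (PySem.List.sorted2 pairs (fun p => p.1) (fun p => p.2) false).map
    (fun kv => "- " ++ kv.1 ++ ": " ++ kv.2)

def metadata_to_note (metadata : List (String × String)) : String :=
  -- the for-loop appending each item to `visible` or `hidden` (state = (visible, hidden))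
  let groups := metadata.foldl
    (fun (acc : List (String × String) × List (String × String)) kv =>
      if pvVisibleMetadata.contains kv.1 then (acc.1 ++ [kv], acc.2) else (acc.1, acc.2 ++ [kv]))
    ([], [])
  let lines := pvPairsToLines groups.1
  let lines := if groups.2 ≠ [] then lines ++ (["<!--"] ++ pvPairsToLines groups.2 ++ ["-->"]) else lines
  PySem.Str.join "\n" lines

-- ===== PORT B =====
-- one fold over the globally sorted items; state = (vis, hid) : Option String × Option String,
-- each section's text grown by direct concatenation (f-strings ported as ++, exact on ASCII)
def metadata_to_note_alt (metadata : List (String × String)) : String :=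
  let st := (PySem.List.sorted2 metadata (fun p => p.1) (fun p => p.2) false).foldl
    (fun (acc : Option String × Option String) kv =>
      let line := "- " ++ kv.1 ++ ": " ++ kv.2
      if pvVisibleMetadata.contains kv.1 then
        (some (match acc.1 with | none => line | some s => s ++ "\n" ++ line), acc.2)
      else
        (acc.1, some (match acc.2 with | none => line | some s => s ++ "\n" ++ line)))
    (none, none)
  let hid : Option String := match st.2 with
    | none => none
    | some h => some ("<!--" ++ "\n" ++ h ++ "\n" ++ "-->")
  match st.1, hid with
  | none, none => ""
  | none, some h => h
  | some v, none => v
  | some v, some h => v ++ "\n" ++ h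

-- ===== PRECONDITION & SPEC =====
def Spec_metadata_to_note (metadata : List (String × String)) (out : String) : Prop := out = metadata_to_note_alt metadata
instance (metadata : List (String × String)) (out : String) : Decidable (Spec_metadata_to_note metadata out) := by unfold Spec_metadata_to_note; infer_instance

-- ===== CLAIM (what is proved, stated in full; the proofs are below) =====
def Claim_equal_metadata_to_note : Prop := ∀ (metadata : List (String × String)), Dom_metadata_to_note metadata → Spec_metadata_to_note metadata (metadata_to_note metadata)

-- ===== LEMMAS AND PROOFS =====

-- the Option-string accumulation step, named for the lemmas
def pvStep (o : Option String) (l : String) : Option String :=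
  some (match o with | none => l | some s => s ++ "\n" ++ l)

-- Str.join "\n" unfolds one cons (String level, via toList)
lemma pv_join_cons (a b : String) (t : List String) :
    PySem.Str.join "\n" (a :: b :: t) = a ++ "\n" ++ PySem.Str.join "\n" (b :: t) := by
  apply String.toList_inj.mp
  simp [PySem.Str.toList_join, String.toList_append, PySem.Chars.join_cons_cons]

lemma pv_join_singleton (a : String) : PySem.Str.join "\n" [a] = a := by
  apply String.toList_inj.mp
  simp [PySem.Str.toList_join, PySem.Chars.join_singleton]

-- join over an append of two nonempty line lists
lemma pv_join_append (xs ys : List String) (hx : xs ≠ []) (hy : ys ≠ []) :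
    PySem.Str.join "\n" (xs ++ ys)
      = PySem.Str.join "\n" xs ++ "\n" ++ PySem.Str.join "\n" ys := by
  induction xs with
  | nil => exact absurd rfl hx
  | cons a t ih =>
    cases t with
    | nil =>
      cases ys with
      | nil => exact absurd rfl hy
      | cons c u => simp only [List.singleton_append, pv_join_cons, pv_join_singleton]
    | cons b t' =>
      rw [List.cons_append, List.cons_append, pv_join_cons, ← List.cons_append,
        ih (by simp), pv_join_cons]
      simp [String.append_assoc]

-- the Option-string fold computes the join of the line list
lemma pv_fold_step_some (ls : List String) (s : String) :
    ls.foldl pvStep (some s) = some (PySem.Str.join "\n" (s :: ls)) := by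
  induction ls generalizing s with
  | nil => simp [pv_join_singleton]
  | cons l t ih =>
    rw [List.foldl_cons, pv_join_cons]
    show t.foldl pvStep (some (s ++ "\n" ++ l)) = _
    rw [ih (s ++ "\n" ++ l)]
    cases t with
    | nil => simp [pv_join_singleton]
    | cons c u => rw [pv_join_cons, pv_join_cons]; simp [String.append_assoc]

lemma pv_fold_step_none (ls : List String) :
    ls.foldl pvStep none
      = if ls = [] then none else some (PySem.Str.join "\n" ls) := by
  cases ls with
  | nil => rfl
  | cons l t =>
    rw [List.foldl_cons]
    show t.foldl pvStep (some l) = _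
    simp [pv_fold_step_some]

-- A's partition fold is a pair of filters
lemma pv_fold_eq_filters (xs : List (String × String)) :
    xs.foldl
      (fun (acc : List (String × String) × List (String × String)) kv =>
        if pvVisibleMetadata.contains kv.1 then (acc.1 ++ [kv], acc.2) else (acc.1, acc.2 ++ [kv]))
      ([], [])
    = (xs.filter (fun kv => pvVisibleMetadata.contains kv.1),
       xs.filter (fun kv => !pvVisibleMetadata.contains kv.1)) := by
  have h : ∀ (a b : List (String × String)),
      xs.foldl
        (fun (acc : List (String × String) × List (String × String)) kv =>
          if pvVisibleMetadata.contains kv.1 then (acc.1 ++ [kv], acc.2) else (acc.1, acc.2 ++ [kv]))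
        (a, b)
      = (a ++ xs.filter (fun kv => pvVisibleMetadata.contains kv.1),
         b ++ xs.filter (fun kv => !pvVisibleMetadata.contains kv.1)) := by
    induction xs with
    | nil => simp
    | cons x t ih =>
      intro a b
      rw [List.foldl_cons, List.filter_cons, List.filter_cons]
      cases hx : pvVisibleMetadata.contains x.1 <;>
        simp only [Bool.not_true, Bool.not_false, if_true] <;>
        rw [ih] <;> simp [List.append_assoc]
  simpa using h [] []

-- B's two-option fold splits into two independent pvStep folds over the filtered line lists
lemma pv_fold_opt_split (xs : List (String × String)) (v h : Option String) :
    xs.foldl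
      (fun (acc : Option String × Option String) kv =>
        let line := "- " ++ kv.1 ++ ": " ++ kv.2
        if pvVisibleMetadata.contains kv.1 then
          (some (match acc.1 with | none => line | some s => s ++ "\n" ++ line), acc.2)
        else
          (acc.1, some (match acc.2 with | none => line | some s => s ++ "\n" ++ line)))
      (v, h)
    = (((xs.filter (fun kv => pvVisibleMetadata.contains kv.1)).map
          (fun kv => "- " ++ kv.1 ++ ": " ++ kv.2)).foldl pvStep v,
       ((xs.filter (fun kv => !pvVisibleMetadata.contains kv.1)).map
          (fun kv => "- " ++ kv.1 ++ ": " ++ kv.2)).foldl pvStep h) := by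
  induction xs generalizing v h with
  | nil => simp
  | cons x t ih =>
    rw [List.foldl_cons, List.filter_cons, List.filter_cons]
    cases hx : pvVisibleMetadata.contains x.1 <;>
      simp only [Bool.not_true, Bool.not_false, if_true, List.map_cons, List.foldl_cons] <;>
      rw [ih] <;> rfl

-- sorted2 on (key, value) pairs is the key-sorted list for the lexicographic order on pairs
lemma pv_sorted2_eq_sorted_toLex (xs : List (String × String)) :
    PySem.List.sorted2 xs (fun p => p.1) (fun p => p.2) false
      = PySem.List.sorted xs (fun p => toLex p) false := by
  simp only [PySem.List.sorted2, PySem.List.sorted]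
  congr 1
  funext acc x
  congr 1
  funext a b
  rcases lt_trichotomy a.1 b.1 with h | h | h
  · simp [h, Prod.Lex.toLex_lt_toLex, not_lt_of_gt h]
  · simp [h, Prod.Lex.toLex_lt_toLex]
  · simp [Prod.Lex.toLex_lt_toLex, h, not_lt_of_gt h, ne_of_gt h]

-- filtering commutes with sorting under the injective key toLex
lemma pv_filter_sorted (p : String × String → Bool) (xs : List (String × String)) :
    (PySem.List.sorted xs (fun q => toLex q) false).filter p
      = PySem.List.sorted (xs.filter p) (fun q => toLex q) false := by
  apply List.Perm.eq_of_pairwise (le := fun a b => toLex a ≤ toLex b)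
  · intro a b _ _ h1 h2
    have : toLex a = toLex b := le_antisymm h1 h2
    exact toLex.injective this
  · exact List.Pairwise.sublist List.filter_sublist (PySem.List.sorted_pairwise xs (fun q => toLex q))
  · exact PySem.List.sorted_pairwise _ _
  · exact ((PySem.List.sorted_perm xs (fun q => toLex q) false).filter p).trans
      (PySem.List.sorted_perm (xs.filter p) (fun q => toLex q) false).symm

-- join of the empty line list
lemma pv_join_nil : PySem.Str.join "\n" [] = "" := by
  apply String.toList_inj.mp
  simp [PySem.Str.toList_join, PySem.Chars.join_nil]

-- ===== VERDICT (by name: the statement is the Claim_ definition above) =====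
theorem metadata_to_note_spec : Claim_equal_metadata_to_note := by
  intro metadata _
  unfold Spec_metadata_to_note metadata_to_note metadata_to_note_alt pvPairsToLines
  simp only [pv_fold_eq_filters, pv_fold_opt_split, pv_sorted2_eq_sorted_toLex, pv_filter_sorted,
    pv_fold_step_none]
  by_cases hh : metadata.filter (fun kv => !pvVisibleMetadata.contains kv.1) = []
  · have hH : PySem.List.sorted (metadata.filter (fun kv => !pvVisibleMetadata.contains kv.1))
        (fun q => toLex q) false = [] := (PySem.List.sorted_eq_nil_iff _ _ _).mpr hh
    rw [hH, if_neg (not_not_intro hh)]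
    simp only [List.map_nil, reduceIte]
    by_cases hv : (PySem.List.sorted (metadata.filter (fun kv => pvVisibleMetadata.contains kv.1))
        (fun q => toLex q) false).map (fun kv => "- " ++ kv.1 ++ ": " ++ kv.2) = []
    · rw [if_pos hv, hv, pv_join_nil]
    · rw [if_neg hv]
  · have hHm : (PySem.List.sorted (metadata.filter (fun kv => !pvVisibleMetadata.contains kv.1))
        (fun q => toLex q) false).map (fun kv => "- " ++ kv.1 ++ ": " ++ kv.2) ≠ [] := by
      intro h
      exact hh ((PySem.List.sorted_eq_nil_iff _ _ _).mp (List.map_eq_nil_iff.mp h))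
    rw [if_pos hh, if_neg hHm]
    by_cases hv : (PySem.List.sorted (metadata.filter (fun kv => pvVisibleMetadata.contains kv.1))
        (fun q => toLex q) false).map (fun kv => "- " ++ kv.1 ++ ": " ++ kv.2) = []
    · rw [if_pos hv, hv, List.nil_append,
        pv_join_append _ ["-->"] (by simp) (by simp),
        pv_join_append ["<!--"] _ (by simp) hHm, pv_join_singleton, pv_join_singleton]
    · rw [if_neg hv,
        pv_join_append _ (["<!--"] ++ _ ++ ["-->"]) hv (by simp),
        pv_join_append _ ["-->"] (by simp) (by simp),
        pv_join_append ["<!--"] _ (by simp) hHm, pv_join_singleton, pv_join_singleton]
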